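-- pv_equiv track=rewrite | github.com/duykienvp/sigspatial-2019-geo-marketplace | searchable-encryption/searchableencryption/rangequery/rangequery.py | convert_hierarchical_list_to_keywords
-- ===== SOURCE A (Python) =====
-- def convert_hierarchical_list_to_keywords(db: dict):
--     """
--     Convert each list of values into keywords. Applied to HIERARCHIAL or GREY encoding.
--     Each 2 consecutive values become part of keyword of that level.
--     Example: [0, 0, 1, 0, 1, 1] => ['00', '0010', '001011']
--     :param db: database
--     :return: converted database
--     """
--     converted_db = dict()
--     for item_id, values in db.items():
--         keywords = list()
--         i = 0
--         keyword = ""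
--         while i < len(values):
--             keyword = keyword + str(values[i]) + str(values[i+1])
--             keywords.append(keyword)
--             i += 2
--         converted_db[item_id] = keywords
--
--     return converted_db
-- ===== SOURCE B (Python) =====
-- def convert_hierarchical_list_to_keywords(db: dict):
--     """
--     Convert each list of values into keywords (HIERARCHICAL or GREY encoding).
--     Each 2 consecutive values become part of the keyword of that level.
--     """
--     converted_db = {}
--     for item_id, values in db.items():
--         pairs = [str(values[i]) + str(values[i + 1]) for i in range(0, len(values), 2)]
--         converted_db[item_id] = ["".join(pairs[:k + 1]) for k in range(len(pairs))]
--     return converted_db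
-- ===== Notes on version B (the rewrite author's own statement) =====
-- stated objective: idiomatic
-- what changed: Replaces the single while-loop with its running string accumulator by two comprehensions: first the list of 2-char chunks, then each keyword as the join of a chunk-list prefix.
import Mathlib
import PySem

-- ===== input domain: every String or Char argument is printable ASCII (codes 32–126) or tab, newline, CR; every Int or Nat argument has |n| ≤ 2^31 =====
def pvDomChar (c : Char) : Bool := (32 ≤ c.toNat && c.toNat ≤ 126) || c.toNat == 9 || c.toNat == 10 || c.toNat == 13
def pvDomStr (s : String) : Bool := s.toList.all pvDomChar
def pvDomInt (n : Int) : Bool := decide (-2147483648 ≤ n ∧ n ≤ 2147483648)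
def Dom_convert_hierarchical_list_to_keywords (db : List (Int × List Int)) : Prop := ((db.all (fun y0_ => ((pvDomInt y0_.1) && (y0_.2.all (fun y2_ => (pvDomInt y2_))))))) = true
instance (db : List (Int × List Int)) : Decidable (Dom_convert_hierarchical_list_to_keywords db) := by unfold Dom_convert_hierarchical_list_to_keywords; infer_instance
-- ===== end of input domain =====

-- B builds each keyword list by two comprehensions (2-char chunks, then joins of chunk prefixes)
-- instead of A's while-loop with a running string accumulator; same cost, more idiomatic.

-- ===== PORT A =====
-- A's while-loop: i, keyword, keywords are exactly A's loop state
def pvALoop (values : List Int) (i : Nat) (keyword : String) (keywords : List String) : List String :=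
  if i < values.length then
    match PySem.List.pyGet? values (i : Int), PySem.List.pyGet? values ((i : Int) + 1) with
    | some a, some b =>
      let kw := keyword ++ PySem.Int.toStr a ++ PySem.Int.toStr b
      pvALoop values (i + 2) kw (keywords ++ [kw])
    | _, _ => keywords   -- values[i+1] raises IndexError (odd length); excluded by Pre_
  else keywords
termination_by values.length - i
decreasing_by omega

def convert_hierarchical_list_to_keywords (db : List (Int × List Int)) : List (Int × List String) :=
  (db.foldl (fun d it => PySem.Dict.insert d it.1 (pvALoop it.2 0 "" [])) PySem.Dict.empty).items

-- ===== PORT B =====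
-- the comprehension body str(values[i]) + str(values[i+1])
def pvBPair (values : List Int) (i : Int) : String :=
  match PySem.List.pyGet? values i, PySem.List.pyGet? values (i + 1) with
  | some a, some b => PySem.Int.toStr a ++ PySem.Int.toStr b
  | _, _ => ""   -- values[i+1] raises IndexError (odd length); excluded by Pre_

-- pairs = [str(values[i]) + str(values[i+1]) for i in range(0, len(values), 2)]
def pvBPairs (values : List Int) : List String :=
  (PySem.List.pyRange 0 (values.length : Int) 2).map (pvBPair values)

-- ["".join(pairs[:k+1]) for k in range(len(pairs))]
def pvBItem (values : List Int) : List String :=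
  (PySem.List.pyRange 0 ((pvBPairs values).length : Int) 1).map (fun k =>
    PySem.Str.join "" (PySem.List.slice (pvBPairs values) none (some (k + 1))))

def convert_hierarchical_list_to_keywords_alt (db : List (Int × List Int)) : List (Int × List String) :=
  (db.foldl (fun d it => PySem.Dict.insert d it.1 (pvBItem it.2)) PySem.Dict.empty).items

-- ===== PRECONDITION & SPEC =====
-- Pre_ excludes value lists of odd length: there both A and B raise IndexError at values[i+1].
def Pre_convert_hierarchical_list_to_keywords (db : List (Int × List Int)) : Prop :=
  ∀ p ∈ db, p.2.length % 2 = 0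
instance (db : List (Int × List Int)) : Decidable (Pre_convert_hierarchical_list_to_keywords db) := by
  unfold Pre_convert_hierarchical_list_to_keywords; infer_instance

def pvWitness_convert_hierarchical_list_to_keywords : (List (Int × List Int)) := [(1, [0, 0, 1, 0, 1, 1])]

def Spec_convert_hierarchical_list_to_keywords (db : List (Int × List Int)) (out : List (Int × List String)) : Prop := out = convert_hierarchical_list_to_keywords_alt db
instance (db : List (Int × List Int)) (out : List (Int × List String)) : Decidable (Spec_convert_hierarchical_list_to_keywords db out) := by unfold Spec_convert_hierarchical_list_to_keywords; infer_instance

-- ===== CLAIM (what is proved, stated in full; the proofs are below) =====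
def Claim_equal_convert_hierarchical_list_to_keywords : Prop := ∀ (db : List (Int × List Int)), Dom_convert_hierarchical_list_to_keywords db → Pre_convert_hierarchical_list_to_keywords db → Spec_convert_hierarchical_list_to_keywords db (convert_hierarchical_list_to_keywords db)

-- ===== LEMMAS AND PROOFS =====

-- reference: cumulative prefixes of a chunk list, starting from accumulator kw
def pvAccP (kw : String) : List String → List String
  | [] => []
  | p :: r => (kw ++ p) :: pvAccP (kw ++ p) r

theorem pv_join_cons (p : String) (l : List String) :
    PySem.Str.join "" (p :: l) = p ++ PySem.Str.join "" l := by
  cases l with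
  | nil => simp [PySem.Str.join, PySem.Chars.join_singleton, PySem.Chars.join_nil]
  | cons q r => simp [PySem.Str.join, PySem.Chars.join_cons_cons]

theorem pvBPairs_nil : pvBPairs [] = [] := by decide

theorem pvBPair_shift (a b : Int) (rest : List Int) (i : Nat) :
    pvBPair (a :: b :: rest) (0 + 2 * ((i : Int) + 1)) = pvBPair rest (0 + 2 * (i : Int)) := by
  unfold pvBPair
  rw [show (0 + 2 * ((i : Int) + 1)) = ((2 * i + 2 : Nat) : Int) by push_cast; ring,
    show (((2 * i + 2 : Nat) : Int) + 1) = ((2 * i + 3 : Nat) : Int) by push_cast; ring,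
    show (0 + 2 * (i : Int)) = ((2 * i : Nat) : Int) by push_cast; ring,
    show (((2 * i : Nat) : Int) + 1) = ((2 * i + 1 : Nat) : Int) by push_cast; ring,
    PySem.List.pyGet?_natCast, PySem.List.pyGet?_natCast,
    PySem.List.pyGet?_natCast, PySem.List.pyGet?_natCast]
  rw [show (2 * i + 2) = (2 * i) + 1 + 1 from rfl, show (2 * i + 3) = (2 * i + 1) + 1 + 1 from rfl]
  simp [List.getElem?_cons_succ]

theorem pvBPair_head (a b : Int) (rest : List Int) :
    pvBPair (a :: b :: rest) (0 + 2 * ((0 : Nat) : Int)) = PySem.Int.toStr a ++ PySem.Int.toStr b := by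
  unfold pvBPair
  rw [show (0 + 2 * ((0 : Nat) : Int)) = ((0 : Nat) : Int) by simp,
    show (((0 : Nat) : Int) + 1) = ((1 : Nat) : Int) by simp,
    PySem.List.pyGet?_natCast, PySem.List.pyGet?_natCast]
  rfl

theorem pvBPairs_cons (a b : Int) (rest : List Int) :
    pvBPairs (a :: b :: rest) = (PySem.Int.toStr a ++ PySem.Int.toStr b) :: pvBPairs rest := by
  unfold pvBPairs
  rw [PySem.List.pyRange_of_pos _ _ (by norm_num), PySem.List.pyRange_of_pos _ _ (by norm_num)]
  have hc : (if (0:Int) < (((a :: b :: rest).length : Nat) : Int)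
        then (((((a :: b :: rest).length : Nat) : Int) - 0 + 2 - 1) / 2).toNat else 0)
      = (if (0:Int) < ((rest.length : Nat) : Int)
        then ((((rest.length : Nat) : Int) - 0 + 2 - 1) / 2).toNat else 0) + 1 := by
    simp only [List.length_cons]
    push_cast
    split_ifs <;> omega
  rw [hc, List.range_succ_eq_map, List.map_cons, List.map_cons]
  simp only [List.map_map]
  congr 1
  · exact pvBPair_head a b rest
  · apply List.map_congr_left
    intro k _
    simp only [Function.comp_apply, Nat.succ_eq_add_one]
    rw [show ((k + 1 : Nat) : Int) = ((k : Int) + 1) by push_cast; ring]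
    exact pvBPair_shift a b rest k

-- A's loop only looks at values from index i on: shift past a consumed pair
theorem pvALoop_shift (a b : Int) (rest : List Int) :
    ∀ (n i : Nat) (kw : String) (ks : List String), rest.length - i ≤ n →
      pvALoop (a :: b :: rest) (i + 2) kw ks = pvALoop rest i kw ks := by
  intro n
  induction n with
  | zero =>
    intro i kw ks hn
    rw [pvALoop, pvALoop]
    have h1 : ¬ i < rest.length := by omega
    simp [List.length_cons, h1, show ¬ i + 2 < rest.length + 1 + 1 by omega]
  | succ m ih =>
    intro i kw ks hn
    rw [pvALoop, pvALoop]
    by_cases h : i < rest.length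
    · rw [if_pos (show i + 2 < (a :: b :: rest).length by simp; omega), if_pos (by omega)]
      have g1 : PySem.List.pyGet? (a :: b :: rest) ((i + 2 : Nat) : Int) = PySem.List.pyGet? rest ((i : Nat) : Int) := by
        rw [show ((i + 2 : Nat) : Int) = ((i + 1 : Nat) : Int) + 1 by push_cast; ring,
          PySem.List.pyGet?_cons_succ,
          show ((i + 1 : Nat) : Int) = ((i : Nat) : Int) + 1 by push_cast; ring,
          PySem.List.pyGet?_cons_succ]
      have g2 : PySem.List.pyGet? (a :: b :: rest) (((i + 2 : Nat) : Int) + 1) = PySem.List.pyGet? rest (((i : Nat) : Int) + 1) := by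
        rw [show ((i + 2 : Nat) : Int) + 1 = ((i + 3 : Nat) : Int) by push_cast; ring,
          show ((i : Nat) : Int) + 1 = ((i + 1 : Nat) : Int) by push_cast; ring,
          PySem.List.pyGet?_natCast, PySem.List.pyGet?_natCast,
          show (i + 3) = (i + 1) + 1 + 1 from rfl]
        simp [List.getElem?_cons_succ]
      rw [g1, g2]
      cases h1 : PySem.List.pyGet? rest ((i : Nat) : Int) with
      | none => rfl
      | some va =>
        cases h2 : PySem.List.pyGet? rest (((i : Nat) : Int) + 1) with
        | none => rfl
        | some vb => exact ih (i + 2) _ _ (by omega)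
    · rw [if_neg (show ¬ i + 2 < (a :: b :: rest).length by simp; omega), if_neg h]

theorem pvALoop_eq_accP :
    ∀ (n : Nat) (values : List Int), values.length ≤ n → values.length % 2 = 0 →
      ∀ (kw : String) (ks : List String),
        pvALoop values 0 kw ks = ks ++ pvAccP kw (pvBPairs values) := by
  intro n
  induction n with
  | zero =>
    intro values hlen _ kw ks
    have h0 : values = [] := List.eq_nil_of_length_eq_zero (by omega)
    subst h0
    rw [pvALoop]
    simp [pvBPairs_nil, pvAccP]
  | succ m ih =>
    intro values hlen hpar kw ks
    match values with
    | [] => rw [pvALoop]; simp [pvBPairs_nil, pvAccP]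
    | [x] => simp at hpar
    | a :: b :: rest =>
      rw [pvALoop]
      rw [if_pos (show 0 < (a :: b :: rest).length by simp)]
      have g1 : PySem.List.pyGet? (a :: b :: rest) (((0 : Nat) : Nat) : Int) = some a := by
        rw [PySem.List.pyGet?_natCast]; rfl
      have g2 : PySem.List.pyGet? (a :: b :: rest) ((((0 : Nat) : Nat) : Int) + 1) = some b := by
        rw [show (((0 : Nat) : Int) + 1) = ((1 : Nat) : Int) by simp, PySem.List.pyGet?_natCast]; rfl
      rw [g1, g2]
      show pvALoop (a :: b :: rest) (0 + 2) (kw ++ PySem.Int.toStr a ++ PySem.Int.toStr b)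
          (ks ++ [kw ++ PySem.Int.toStr a ++ PySem.Int.toStr b])
        = ks ++ pvAccP kw (pvBPairs (a :: b :: rest))
      rw [show (0 + 2 : Nat) = 0 + 2 from rfl, pvALoop_shift a b rest rest.length 0 _ _ (by omega)]
      rw [ih rest (by simp at hlen; omega) (by simp at hpar; omega)]
      rw [pvBPairs_cons]
      simp only [pvAccP]
      simp [String.append_assoc]

theorem pv_prefix_map (ps : List String) :
    ∀ kw, (List.range ps.length).map (fun k => kw ++ PySem.Str.join "" (ps.take (k + 1))) = pvAccP kw ps := by
  induction ps with
  | nil => intro kw; simp [pvAccP]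
  | cons p r ihr =>
    intro kw
    rw [List.length_cons, List.range_succ_eq_map, List.map_cons, List.map_map]
    simp only [pvAccP]
    congr 1
    · simp [PySem.Str.join]
    · rw [← ihr (kw ++ p)]
      apply List.map_congr_left
      intro k _
      simp only [Function.comp_apply, Nat.succ_eq_add_one]
      rw [show k + 1 + 1 = (k + 1) + 1 from rfl, List.take_succ_cons, pv_join_cons,
        ← String.append_assoc]

theorem pvBItem_eq_accP (values : List Int) : pvBItem values = pvAccP "" (pvBPairs values) := by
  unfold pvBItem
  rw [PySem.List.pyRange_one]
  simp only [sub_zero, Int.toNat_natCast, List.map_map]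
  rw [← pv_prefix_map (pvBPairs values) ""]
  apply List.map_congr_left
  intro k _
  simp only [Function.comp_apply]
  rw [show (0 : Int) + (k : Int) + 1 = ((k + 1 : Nat) : Int) by push_cast; ring,
    PySem.List.slice_to_natCast]
  simp

theorem pvItem_eq (values : List Int) (h : values.length % 2 = 0) :
    pvALoop values 0 "" [] = pvBItem values := by
  rw [pvALoop_eq_accP values.length values le_rfl h "" [], pvBItem_eq_accP]
  simp

-- ===== VERDICT (by name: the statement is the Claim_ definition above) =====
theorem convert_hierarchical_list_to_keywords_spec : Claim_equal_convert_hierarchical_list_to_keywords := by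
  intro db _ hpre
  unfold Spec_convert_hierarchical_list_to_keywords
  unfold convert_hierarchical_list_to_keywords convert_hierarchical_list_to_keywords_alt
  congr 1
  apply PySem.List.foldl_congr_mem
  intro acc x hx
  rw [pvItem_eq x.2 (hpre x hx)]
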